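-- pv_equiv track=rewrite | github.com/na-ta-pat/plaworld | board.py | grid_dfs
-- ===== SOURCE A (Python) =====
-- def grid_dfs(grid, entry, exit):
--     stack, visited = [entry], {entry}
--     while stack:
--         x, y = stack.pop()
--         if (x, y) == exit: return True
--         for dx, dy in [(0,1),(0,-1),(-1,0),(1,0)]:
--             nx, ny = x+dx, y+dy
--             if 0<=nx<len(grid) and 0<=ny<len(grid[0]) and grid[nx][ny] is None and (nx, ny) not in visited:
--                 stack.append((nx, ny))
--                 visited.add((nx, ny))
--     return False
-- ===== SOURCE B (Python) =====
-- def grid_dfs(grid, entry, exit):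
--     rows = len(grid)
--     cols = len(grid[0]) if grid else 0
--     reach = {entry}
--     changed = True
--     while changed:
--         changed = False
--         for x in range(rows):
--             for y in range(cols):
--                 if grid[x][y] is None and (x, y) not in reach and (
--                         (x + 1, y) in reach or (x - 1, y) in reach
--                         or (x, y + 1) in reach or (x, y - 1) in reach):
--                     reach.add((x, y))
--                     changed = True
--     return exit in reach
-- ===== Notes on version B (the rewrite author's own statement) =====
-- stated objective: alternative
-- what changed: Replaces the explicit-stack depth-first search with visited-set bookkeeping by a round-based flood-fill: B sweeps the whole grid repeatedly, adding any None cell adjacent to the already-reachable set, until a fixpoint, then just tests membership of exit.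
-- outside the precondition, e.g. on grid_dfs([[None], []], (5, 5), (0, 0)): A returns False, B raises IndexError
import Mathlib
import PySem

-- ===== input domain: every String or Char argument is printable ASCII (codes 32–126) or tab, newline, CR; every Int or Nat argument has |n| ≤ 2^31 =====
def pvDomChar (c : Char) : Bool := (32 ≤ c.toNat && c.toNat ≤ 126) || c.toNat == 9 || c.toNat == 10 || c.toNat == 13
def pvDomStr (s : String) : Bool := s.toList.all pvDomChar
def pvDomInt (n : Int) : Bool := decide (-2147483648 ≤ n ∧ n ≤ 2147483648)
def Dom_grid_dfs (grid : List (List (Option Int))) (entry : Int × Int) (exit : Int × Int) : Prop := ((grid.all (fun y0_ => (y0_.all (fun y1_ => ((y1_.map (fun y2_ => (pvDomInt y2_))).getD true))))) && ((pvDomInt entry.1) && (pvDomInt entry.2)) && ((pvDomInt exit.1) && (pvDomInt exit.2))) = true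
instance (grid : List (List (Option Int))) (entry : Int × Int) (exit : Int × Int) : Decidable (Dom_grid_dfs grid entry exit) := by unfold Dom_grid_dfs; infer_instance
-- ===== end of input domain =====

-- B replaces A's stack-based depth-first search by a round-based saturation (flood-fill to a
-- fixpoint) over the whole grid: no frontier stack, just a reachable set grown pass by pass
-- (objective: alternative algorithm; no speed claim).

-- ===== PORT A =====
-- the four direction offsets of A's inner loop
def pvDirsA : List (Int × Int) := [(0,1),(0,-1),(-1,0),(1,0)]

-- 'grid[nx][ny] is None'; exact wherever Python does not raise (a short row raises IndexError
-- in Python and is excluded by Pre_; here such a cell just reads as non-None)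
def pvCellNone (grid : List (List (Option Int))) (x y : Int) : Bool :=
  match PySem.List.pyGet? grid x with
  | some row =>
    match PySem.List.pyGet? row y with
    | some v => v.isNone
    | none => false
  | none => false

-- one direction of A's 'for dx, dy in …' inner loop, over the state (stack, visited)
def pvStepA (grid : List (List (Option Int))) (R C : Int) (x y : Int)
    (acc : List (Int × Int) × PySem.Set (Int × Int)) (d : Int × Int) :
    List (Int × Int) × PySem.Set (Int × Int) :=
  let nx := x + d.1
  let ny := y + d.2
  if 0 ≤ nx ∧ nx < R ∧ 0 ≤ ny ∧ ny < C ∧ pvCellNone grid nx ny = true ∧ ¬ (nx, ny) ∈ acc.2 then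
    (acc.1 ++ [(nx, ny)], PySem.Set.add acc.2 (nx, ny))
  else acc

-- A's 'while stack' loop; 'stack.pop()' pops the LAST element; the fuel is an upper bound on
-- the number of iterations only (proved never reached below)
def pvLoopA (grid : List (List (Option Int))) (R C : Int) (exit : Int × Int) :
    Nat → List (Int × Int) → PySem.Set (Int × Int) → Bool
  | 0, _, _ => false
  | fuel + 1, stack, visited =>
    match stack.getLast? with
    | none => false
    | some p =>
      if p = exit then true
      else
        let r := pvDirsA.foldl (pvStepA grid R C p.1 p.2) (stack.dropLast, visited)
        pvLoopA grid R C exit fuel r.1 r.2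

def grid_dfs (grid : List (List (Option Int))) (entry : Int × Int) (exit : Int × Int) : Bool :=
  pvLoopA grid (grid.length : Int) ((grid.headD []).length : Int) exit
    (2 * (grid.length * (grid.headD []).length + 1)) [entry] (PySem.Set.ofList [entry])

-- ===== PORT B =====
-- ('grid[x][y] is None' is read with the same accessor pvCellNone as in port A)
-- body of B's innermost 'if'; the state is (reach, changed)
def pvStepB (grid : List (List (Option Int)))
    (acc : PySem.Set (Int × Int) × Bool) (x y : Int) : PySem.Set (Int × Int) × Bool :=
  if pvCellNone grid x y = true ∧ ¬ (x, y) ∈ acc.1 ∧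
      ((x + 1, y) ∈ acc.1 ∨ (x - 1, y) ∈ acc.1 ∨ (x, y + 1) ∈ acc.1 ∨ (x, y - 1) ∈ acc.1) then
    (PySem.Set.add acc.1 (x, y), true)
  else acc

-- one full pass 'for x in range(rows): for y in range(cols): …'
def pvPassB (grid : List (List (Option Int))) (rows cols : Int)
    (acc : PySem.Set (Int × Int) × Bool) : PySem.Set (Int × Int) × Bool :=
  (PySem.List.pyRange 0 rows 1).foldl
    (fun a x => (PySem.List.pyRange 0 cols 1).foldl (fun a y => pvStepB grid a x y) a) acc

-- B's 'while changed' loop; the fuel is an upper bound on the number of passes only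
-- (proved never reached below)
def pvLoopB (grid : List (List (Option Int))) (rows cols : Int) :
    Nat → PySem.Set (Int × Int) → PySem.Set (Int × Int)
  | 0, reach => reach
  | fuel + 1, reach =>
    let r := pvPassB grid rows cols (reach, false)
    if r.2 then pvLoopB grid rows cols fuel r.1 else r.1

def grid_dfs_alt (grid : List (List (Option Int))) (entry : Int × Int) (exit : Int × Int) : Bool :=
  let final := pvLoopB grid (grid.length : Int) ((grid.headD []).length : Int)
    (grid.length * (grid.headD []).length + 2) (PySem.Set.ofList [entry])
  PySem.Set.contains final exit

-- ===== PRECONDITION & SPEC =====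
-- Pre_ excludes ragged grids having a row shorter than row 0: on those Python A raises
-- IndexError whenever its search reaches a cell missing from such a row (and B always raises).
def Pre_grid_dfs (grid : List (List (Option Int))) (entry : Int × Int) (exit : Int × Int) : Prop :=
  ∀ row ∈ grid, (grid.headD []).length ≤ row.length
instance (grid : List (List (Option Int))) (entry : Int × Int) (exit : Int × Int) : Decidable (Pre_grid_dfs grid entry exit) := by unfold Pre_grid_dfs; infer_instance

def pvWitness_grid_dfs : List (List (Option Int)) × (Int × Int) × (Int × Int) :=
  ([[none, some 1], [none, none]], (0, 0), (1, 1))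

def Spec_grid_dfs (grid : List (List (Option Int))) (entry : Int × Int) (exit : Int × Int) (out : Bool) : Prop := out = grid_dfs_alt grid entry exit
instance (grid : List (List (Option Int))) (entry : Int × Int) (exit : Int × Int) (out : Bool) : Decidable (Spec_grid_dfs grid entry exit out) := by unfold Spec_grid_dfs; infer_instance

-- ===== CLAIM (what is proved, stated in full; the proofs are below) =====
def Claim_equal_grid_dfs : Prop := ∀ (grid : List (List (Option Int))) (entry : Int × Int) (exit : Int × Int), Dom_grid_dfs grid entry exit → Pre_grid_dfs grid entry exit → Spec_grid_dfs grid entry exit (grid_dfs grid entry exit)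

-- ===== LEMMAS AND PROOFS =====

def pvOk (grid : List (List (Option Int))) (p : Int × Int) : Prop :=
  0 ≤ p.1 ∧ p.1 < (grid.length : Int) ∧ 0 ≤ p.2 ∧ p.2 < ((grid.headD []).length : Int) ∧
    pvCellNone grid p.1 p.2 = true

def pvStep (grid : List (List (Option Int))) (p q : Int × Int) : Prop :=
  (∃ d ∈ pvDirsA, q = (p.1 + d.1, p.2 + d.2)) ∧ pvOk grid q

def pvReach (grid : List (List (Option Int))) (entry p : Int × Int) : Prop :=
  Relation.ReflTransGen (pvStep grid) entry p

def pvCells (rows cols : Int) : List (Int × Int) :=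
  (PySem.List.pyRange 0 rows 1).flatMap
    (fun x => (PySem.List.pyRange 0 cols 1).map (fun y => (x, y)))

theorem pvCells_length (rows cols : Nat) :
    (pvCells (rows : Int) (cols : Int)).length = rows * cols := by
  simp [pvCells, List.length_flatMap, PySem.List.length_pyRange_one]

theorem pvMem_cells (rows cols : Nat) (p : Int × Int) :
    p ∈ pvCells (rows : Int) (cols : Int) ↔
      0 ≤ p.1 ∧ p.1 < (rows : Int) ∧ 0 ≤ p.2 ∧ p.2 < (cols : Int) := by
  simp only [pvCells, List.mem_flatMap, List.mem_map, PySem.List.mem_pyRange_one]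
  constructor
  · rintro ⟨x, ⟨hx0, hx1⟩, y, ⟨hy0, hy1⟩, rfl⟩
    exact ⟨hx0, hx1, hy0, hy1⟩
  · rintro ⟨h0, h1, h2, h3⟩
    exact ⟨p.1, ⟨h0, h1⟩, p.2, ⟨h2, h3⟩, rfl⟩

theorem pvNodupLenLe (l l' : List (Int × Int)) (h : l.Nodup) (hs : l ⊆ l') :
    l.length ≤ l'.length := by
  have h2 : l.toFinset ⊆ l'.toFinset := by
    intro x hx; simp only [List.mem_toFinset] at hx ⊢; exact hs hx
  calc l.length = l.toFinset.card := (List.toFinset_card_of_nodup h).symm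
    _ ≤ l'.toFinset.card := Finset.card_le_card h2
    _ ≤ l'.length := List.toFinset_card_le l'

theorem pvCard (grid : List (List (Option Int))) (entry : Int × Int)
    (v : List (Int × Int)) (hnd : v.Nodup)
    (hm : ∀ p ∈ v, p = entry ∨ pvOk grid p) :
    v.length ≤ grid.length * (grid.headD []).length + 1 := by
  have hsub : v ⊆ entry :: pvCells (grid.length : Int) ((grid.headD []).length : Int) := by
    intro p hp
    rcases hm p hp with rfl | hok
    · exact List.mem_cons_self
    · exact List.mem_cons_of_mem _
        ((pvMem_cells _ _ p).mpr ⟨hok.1, hok.2.1, hok.2.2.1, hok.2.2.2.1⟩)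
  have := pvNodupLenLe v _ hnd hsub
  simpa [pvCells_length] using this

theorem pvEscape (grid : List (List (Option Int))) (exit : Int × Int)
    (s v : List (Int × Int))
    (hclosed : ∀ p ∈ v, p ∉ s → ∀ q, pvStep grid p q → q ∈ v)
    (hexit : exit ∈ v → exit ∈ s) :
    ∀ x, Relation.ReflTransGen (pvStep grid) x exit → x ∈ v →
      ∃ r ∈ s, Relation.ReflTransGen (pvStep grid) r exit := by
  intro x hx
  induction hx using Relation.ReflTransGen.head_induction_on with
  | refl => intro hv; exact ⟨exit, hexit hv, Relation.ReflTransGen.refl⟩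
  | head hstep htail ih =>
    rename_i a c
    intro hv
    by_cases hs : a ∈ s
    · exact ⟨a, hs, Relation.ReflTransGen.head hstep htail⟩
    · exact ih (hclosed a hv hs c hstep)

theorem pvFoldA_spec (grid : List (List (Option Int))) (R C x y : Int)
    (dirs : List (Int × Int)) :
    ∀ (st : List (Int × Int)) (vv : PySem.Set (Int × Int)),
    ∃ Δ : List (Int × Int),
      dirs.foldl (pvStepA grid R C x y) (st, vv) = (st ++ Δ, vv ++ Δ) ∧
      Δ.Nodup ∧ (∀ q ∈ Δ, ¬ q ∈ vv) ∧
      (∀ q ∈ Δ, (∃ d ∈ dirs, q = (x + d.1, y + d.2)) ∧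
        (0 ≤ q.1 ∧ q.1 < R ∧ 0 ≤ q.2 ∧ q.2 < C ∧ pvCellNone grid q.1 q.2 = true)) ∧
      (∀ d ∈ dirs,
        (0 ≤ x + d.1 ∧ x + d.1 < R ∧ 0 ≤ y + d.2 ∧ y + d.2 < C ∧
          pvCellNone grid (x + d.1) (y + d.2) = true) → (x + d.1, y + d.2) ∈ vv ++ Δ) := by
  induction dirs with
  | nil =>
    intro st vv
    exact ⟨[], by simp, by simp, by simp, by simp, by simp⟩
  | cons d ds ih =>
    intro st vv
    by_cases hc : 0 ≤ x + d.1 ∧ x + d.1 < R ∧ 0 ≤ y + d.2 ∧ y + d.2 < C ∧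
        pvCellNone grid (x + d.1) (y + d.2) = true ∧ ¬ (x + d.1, y + d.2) ∈ vv
    · have hstep : pvStepA grid R C x y (st, vv) d =
          (st ++ [(x + d.1, y + d.2)], vv ++ [(x + d.1, y + d.2)]) := by
        simp only [pvStepA, if_pos hc]
        rw [PySem.Set.add_of_not_mem hc.2.2.2.2.2]
      obtain ⟨Δ', h1, h2, h3, h4, h5⟩ := ih (st ++ [(x + d.1, y + d.2)]) (vv ++ [(x + d.1, y + d.2)])
      refine ⟨(x + d.1, y + d.2) :: Δ', ?_, ?_, ?_, ?_, ?_⟩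
      · rw [List.foldl_cons, hstep, h1]; simp
      · refine List.nodup_cons.mpr ⟨fun hmem => ?_, h2⟩
        exact h3 _ hmem (by simp)
      · intro q hq
        rcases List.mem_cons.mp hq with rfl | hq'
        · exact hc.2.2.2.2.2
        · intro hqv; exact h3 q hq' (by simp [hqv])
      · intro q hq
        rcases List.mem_cons.mp hq with rfl | hq'
        · exact ⟨⟨d, by simp, rfl⟩, hc.1, hc.2.1, hc.2.2.1, hc.2.2.2.1, hc.2.2.2.2.1⟩
        · obtain ⟨⟨d', hd', hq⟩, hrest⟩ := h4 q hq'
          exact ⟨⟨d', by simp [hd'], hq⟩, hrest⟩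
      · intro d' hd' hok
        rcases List.mem_cons.mp hd' with rfl | hd''
        · simp
        · have := h5 d' hd'' hok
          simpa [List.append_assoc] using this
    · have hstep : pvStepA grid R C x y (st, vv) d = (st, vv) := by
        simp only [pvStepA, if_neg hc]
      obtain ⟨Δ', h1, h2, h3, h4, h5⟩ := ih st vv
      refine ⟨Δ', by rw [List.foldl_cons, hstep]; exact h1, h2, h3, ?_, ?_⟩
      · intro q hq
        obtain ⟨⟨d', hd', hq'⟩, hrest⟩ := h4 q hq
        exact ⟨⟨d', by simp [hd'], hq'⟩, hrest⟩
      · intro d' hd' hok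
        rcases List.mem_cons.mp hd' with rfl | hd''
        · have : (x + d'.1, y + d'.2) ∈ vv := by
            by_contra hnm
            exact hc ⟨hok.1, hok.2.1, hok.2.2.1, hok.2.2.2.1, hok.2.2.2.2, hnm⟩
          simp [this]
        · exact h5 d' hd'' hok

theorem pvLoopA_correct (grid : List (List (Option Int))) (entry exit : Int × Int) :
    ∀ (fuel : Nat) (s : List (Int × Int)) (v : PySem.Set (Int × Int)),
    (∀ p ∈ s, p ∈ v) →
    (exit ∈ v → exit ∈ s) →
    (∀ p ∈ v, p ∉ s → ∀ q, pvStep grid p q → q ∈ v) →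
    s.Nodup → v.Nodup →
    (∀ p ∈ v, p = entry ∨ pvOk grid p) →
    s.length + 2 * (grid.length * (grid.headD []).length + 1) ≤ fuel + 2 * v.length →
    (pvLoopA grid (grid.length : Int) ((grid.headD []).length : Int) exit fuel s v = true ↔
      ∃ p ∈ s, Relation.ReflTransGen (pvStep grid) p exit) := by
  intro fuel
  induction fuel with
  | zero =>
    intro s v hsv hexit hclosed hsnd hvnd hmem hfuel
    have hcard := pvCard grid entry v hvnd hmem
    have hs0 : s = [] := List.length_eq_zero_iff.mp (by omega)
    subst hs0
    simp [pvLoopA]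
  | succ fuel ih =>
    intro s v hsv hexit hclosed hsnd hvnd hmem hfuel
    cases hlast : s.getLast? with
    | none =>
      have hs0 : s = [] := List.getLast?_eq_none_iff.mp hlast
      subst hs0
      simp [pvLoopA]
    | some p =>
      have hs_eq : s.dropLast ++ [p] = s := List.dropLast_append_getLast? p hlast
      have hps : p ∈ s := by rw [← hs_eq]; simp
      by_cases hp : p = exit
      · subst hp
        constructor
        · intro _; exact ⟨p, hps, Relation.ReflTransGen.refl⟩
        · intro _; simp [pvLoopA, hlast]
      · -- unfold one iteration
        have hunf : pvLoopA grid (grid.length : Int) ((grid.headD []).length : Int) exit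
            (fuel + 1) s v =
            pvLoopA grid (grid.length : Int) ((grid.headD []).length : Int) exit fuel
              (pvDirsA.foldl (pvStepA grid (grid.length : Int) ((grid.headD []).length : Int) p.1 p.2)
                (s.dropLast, v)).1
              (pvDirsA.foldl (pvStepA grid (grid.length : Int) ((grid.headD []).length : Int) p.1 p.2)
                (s.dropLast, v)).2 := by
          conv_lhs => rw [pvLoopA]
          rw [hlast]
          simp [hp]
        obtain ⟨Δ, h1, h2, h3, h4, h5⟩ :=
          pvFoldA_spec grid (grid.length : Int) ((grid.headD []).length : Int) p.1 p.2 pvDirsA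
            s.dropLast v
        set rest := s.dropLast with hrest
        -- basic facts
        have hrest_sub : rest ⊆ s := by rw [← hs_eq]; intro a ha; exact List.mem_append_left _ ha
        have hrest_nd : rest.Nodup := hsnd.sublist (List.dropLast_sublist s)
        have hpnotrest : p ∉ rest := by
          have := hsnd
          rw [← hs_eq] at this
          have := List.disjoint_of_nodup_append this
          intro hmem'
          exact this hmem' (by simp)
        have hrest_len : rest.length + 1 = s.length := by
          rw [← hs_eq]; simp
        have hΔok : ∀ q ∈ Δ, pvOk grid q := fun q hq => (h4 q hq).2
        have hΔstep : ∀ q ∈ Δ, pvStep grid p q := by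
          intro q hq
          obtain ⟨⟨d, hd, hq'⟩, hok⟩ := h4 q hq
          exact ⟨⟨d, hd, hq'⟩, hok⟩
        have hΔnotv : ∀ q ∈ Δ, q ∉ v := h3
        -- completeness of the expansion of p
        have hpdone : ∀ q, pvStep grid p q → q ∈ v ++ Δ := by
          intro q hq
          obtain ⟨⟨d, hd, hq'⟩, hok⟩ := hq
          subst hq'
          exact h5 d hd ⟨hok.1, hok.2.1, hok.2.2.1, hok.2.2.2.1, hok.2.2.2.2⟩
        -- new invariants
        have hsv' : ∀ q ∈ rest ++ Δ, q ∈ v ++ Δ := by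
          intro q hq
          rcases List.mem_append.mp hq with h | h
          · exact List.mem_append_left _ (hsv q (hrest_sub h))
          · exact List.mem_append_right _ h
        have hexit' : exit ∈ v ++ Δ → exit ∈ rest ++ Δ := by
          intro h
          rcases List.mem_append.mp h with h | h
          · have := hexit h
            rw [← hs_eq] at this
            rcases List.mem_append.mp this with h' | h'
            · exact List.mem_append_left _ h'
            · simp at h'; exact absurd h'.symm hp
          · exact List.mem_append_right _ h
        have hclosed' : ∀ a ∈ v ++ Δ, a ∉ rest ++ Δ → ∀ q, pvStep grid a q → q ∈ v ++ Δ := by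
          intro a ha hans q hq
          rcases List.mem_append.mp ha with hav | haΔ
          · by_cases hap : a = p
            · subst hap; exact hpdone q hq
            · have hanots : a ∉ s := by
                intro has
                rw [← hs_eq] at has
                rcases List.mem_append.mp has with h' | h'
                · exact hans (List.mem_append_left _ h')
                · simp at h'; exact hap h'
              exact List.mem_append_left _ (hclosed a hav hanots q hq)
          · exact absurd (List.mem_append_right rest haΔ) hans
        have hsnd' : (rest ++ Δ).Nodup := by
          refine List.Nodup.append hrest_nd h2 ?_
          intro a ha haΔ
          exact h3 a haΔ (hsv a (hrest_sub ha))
        have hvnd' : (v ++ Δ).Nodup := by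
          refine List.Nodup.append hvnd h2 ?_
          intro a ha haΔ
          exact h3 a haΔ ha
        have hmem' : ∀ q ∈ v ++ Δ, q = entry ∨ pvOk grid q := by
          intro q hq
          rcases List.mem_append.mp hq with h | h
          · exact hmem q h
          · exact Or.inr (hΔok q h)
        have hfuel' : (rest ++ Δ).length + 2 * (grid.length * (grid.headD []).length + 1) ≤
            fuel + 2 * (v ++ Δ).length := by
          simp only [List.length_append]
          omega
        have hIH := ih (rest ++ Δ) (v ++ Δ) hsv' hexit' hclosed' hsnd' hvnd' hmem' hfuel'
        rw [hunf, h1, hIH]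
        -- bridge: ∃ in rest ++ Δ ↔ ∃ in s
        constructor
        · rintro ⟨p0, hp0, hpath⟩
          rcases List.mem_append.mp hp0 with h | h
          · exact ⟨p0, hrest_sub h, hpath⟩
          · exact ⟨p, hps, Relation.ReflTransGen.head (hΔstep p0 h) hpath⟩
        · rintro ⟨p0, hp0, hpath⟩
          rw [← hs_eq] at hp0
          rcases List.mem_append.mp hp0 with h | h
          · exact ⟨p0, List.mem_append_left _ h, hpath⟩
          · simp at h
            subst h
            rcases Relation.ReflTransGen.cases_head hpath with heq | ⟨q, hq, hqpath⟩
            · exact absurd heq hp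
            · exact pvEscape grid exit (rest ++ Δ) (v ++ Δ) hclosed' hexit' q hqpath (hpdone q hq)

theorem grid_dfs_iff (grid : List (List (Option Int))) (entry exit : Int × Int) :
    grid_dfs grid entry exit = true ↔ pvReach grid entry exit := by
  have hof : PySem.Set.ofList [entry] = [entry] := by
    simp [PySem.Set.ofList, PySem.Set.add, PySem.Set.empty]
  rw [grid_dfs, hof,
    pvLoopA_correct grid entry exit _ [entry] [entry]
      (by simp) (by simp) (by simp) (by simp) (by simp) (by simp) (by simp; omega)]
  simp [pvReach]

-- the nested range loops of a pass, flattened to one fold over the cell list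
theorem pvPassB_eq (grid : List (List (Option Int))) (rows cols : Int)
    (acc : PySem.Set (Int × Int) × Bool) :
    pvPassB grid rows cols acc =
      (pvCells rows cols).foldl (fun a c => pvStepB grid a c.1 c.2) acc := by
  rw [pvCells, List.foldl_flatMap]
  simp [pvPassB, List.foldl_map]

-- cell-fold preservation facts, by induction on the cell list
theorem pvFoldB_flag (grid : List (List (Option Int))) (cl : List (Int × Int)) :
    ∀ acc : PySem.Set (Int × Int) × Bool, acc.2 = true →
      (cl.foldl (fun a c => pvStepB grid a c.1 c.2) acc).2 = true := by
  induction cl with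
  | nil => intro acc h; exact h
  | cons c cs ih =>
    intro acc h
    rw [List.foldl_cons]
    apply ih
    unfold pvStepB
    split <;> simp [h]

theorem pvFoldB_mono (grid : List (List (Option Int))) (cl : List (Int × Int)) :
    ∀ (acc : PySem.Set (Int × Int) × Bool) (p : Int × Int), p ∈ acc.1 →
      p ∈ (cl.foldl (fun a c => pvStepB grid a c.1 c.2) acc).1 := by
  induction cl with
  | nil => intro acc p h; exact h
  | cons c cs ih =>
    intro acc p h
    rw [List.foldl_cons]
    apply ih
    unfold pvStepB
    split
    · simp [PySem.Set.mem_add, h]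
    · exact h

theorem pvFoldB_len (grid : List (List (Option Int))) (cl : List (Int × Int)) :
    ∀ acc : PySem.Set (Int × Int) × Bool,
      acc.1.length ≤ (cl.foldl (fun a c => pvStepB grid a c.1 c.2) acc).1.length := by
  induction cl with
  | nil => intro acc; exact le_refl _
  | cons c cs ih =>
    intro acc
    rw [List.foldl_cons]
    refine le_trans ?_ (ih _)
    unfold pvStepB
    split
    · rename_i hc
      rw [PySem.Set.add_of_not_mem hc.2.1]
      simp
    · exact le_refl _

theorem pvFoldB_nochange (grid : List (List (Option Int))) (cl : List (Int × Int)) :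
    ∀ S : PySem.Set (Int × Int),
      (cl.foldl (fun a c => pvStepB grid a c.1 c.2) (S, false)).2 = false →
      cl.foldl (fun a c => pvStepB grid a c.1 c.2) (S, false) = (S, false) := by
  induction cl with
  | nil => intro S _; rfl
  | cons c cs ih =>
    intro S hfl
    rw [List.foldl_cons] at hfl ⊢
    by_cases hc : pvCellNone grid c.1 c.2 = true ∧ ¬ (c.1, c.2) ∈ (S : List (Int × Int)) ∧
        ((c.1 + 1, c.2) ∈ (S : List (Int × Int)) ∨ (c.1 - 1, c.2) ∈ (S : List (Int × Int)) ∨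
         (c.1, c.2 + 1) ∈ (S : List (Int × Int)) ∨ (c.1, c.2 - 1) ∈ (S : List (Int × Int)))
    · exfalso
      have : pvStepB grid (S, false) c.1 c.2 = (PySem.Set.add S (c.1, c.2), true) := by
        unfold pvStepB; rw [if_pos hc]
      rw [this] at hfl
      rw [pvFoldB_flag grid cs _ rfl] at hfl
      simp at hfl
    · have : pvStepB grid (S, false) c.1 c.2 = (S, false) := by
        unfold pvStepB; rw [if_neg hc]
      rw [this] at hfl ⊢
      exact ih S hfl

theorem pvFoldB_fixcond (grid : List (List (Option Int))) (cl : List (Int × Int)) :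
    ∀ S : PySem.Set (Int × Int),
      cl.foldl (fun a c => pvStepB grid a c.1 c.2) (S, false) = (S, false) →
      ∀ c ∈ cl, ¬ (pvCellNone grid c.1 c.2 = true ∧ ¬ (c.1, c.2) ∈ (S : List (Int × Int)) ∧
        ((c.1 + 1, c.2) ∈ (S : List (Int × Int)) ∨ (c.1 - 1, c.2) ∈ (S : List (Int × Int)) ∨
         (c.1, c.2 + 1) ∈ (S : List (Int × Int)) ∨ (c.1, c.2 - 1) ∈ (S : List (Int × Int)))) := by
  induction cl with
  | nil => intro S _ c hc; exact absurd hc (List.not_mem_nil)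
  | cons c cs ih =>
    intro S hfix c' hc'
    rw [List.foldl_cons] at hfix
    by_cases hc : pvCellNone grid c.1 c.2 = true ∧ ¬ (c.1, c.2) ∈ (S : List (Int × Int)) ∧
        ((c.1 + 1, c.2) ∈ (S : List (Int × Int)) ∨ (c.1 - 1, c.2) ∈ (S : List (Int × Int)) ∨
         (c.1, c.2 + 1) ∈ (S : List (Int × Int)) ∨ (c.1, c.2 - 1) ∈ (S : List (Int × Int)))
    · exfalso
      have hst : pvStepB grid (S, false) c.1 c.2 = (PySem.Set.add S (c.1, c.2), true) := by
        unfold pvStepB; rw [if_pos hc]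
      rw [hst] at hfix
      have := pvFoldB_flag grid cs (PySem.Set.add S (c.1, c.2), true) rfl
      rw [hfix] at this
      simp at this
    · have hst : pvStepB grid (S, false) c.1 c.2 = (S, false) := by
        unfold pvStepB; rw [if_neg hc]
      rw [hst] at hfix
      rcases List.mem_cons.mp hc' with rfl | h
      · exact hc
      · exact ih S hfix c' h

theorem pvFoldB_sound (grid : List (List (Option Int))) (entry : Int × Int)
    (cl : List (Int × Int))
    (hcl : ∀ c ∈ cl, 0 ≤ c.1 ∧ c.1 < (grid.length : Int) ∧ 0 ≤ c.2 ∧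
      c.2 < ((grid.headD []).length : Int)) :
    ∀ acc : PySem.Set (Int × Int) × Bool,
      (∀ p ∈ acc.1, pvReach grid entry p) →
      ∀ p ∈ (cl.foldl (fun a c => pvStepB grid a c.1 c.2) acc).1, pvReach grid entry p := by
  induction cl with
  | nil => intro acc h; exact h
  | cons c cs ih =>
    intro acc hacc
    rw [List.foldl_cons]
    refine ih (fun c' hc' => hcl c' (List.mem_cons_of_mem _ hc')) _ ?_
    intro p hp
    unfold pvStepB at hp
    split at hp
    · rename_i hc
      rcases (PySem.Set.mem_add _ _ _).mp hp with hps | rfl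
      · exact hacc p hps
      · -- (c.1, c.2) was added: some neighbour r is in acc.1 and reachable
        obtain ⟨hb0, hb1, hb2, hb3⟩ := hcl c List.mem_cons_self
        have hok : pvOk grid (c.1, c.2) := by
          refine ⟨hb0, hb1, hb2, hb3, ?_⟩
          exact hc.1
        rcases hc.2.2 with hr | hr | hr | hr
        · exact Relation.ReflTransGen.tail (hacc _ hr)
            ⟨⟨(-1, 0), by simp [pvDirsA], by simp⟩, hok⟩
        · exact Relation.ReflTransGen.tail (hacc _ hr)
            ⟨⟨(1, 0), by simp [pvDirsA], by simp⟩, hok⟩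
        · exact Relation.ReflTransGen.tail (hacc _ hr)
            ⟨⟨(0, -1), by simp [pvDirsA], by simp⟩, hok⟩
        · exact Relation.ReflTransGen.tail (hacc _ hr)
            ⟨⟨(0, 1), by simp [pvDirsA], by simp⟩, hok⟩
    · exact hacc p hp

theorem pvFoldB_members (grid : List (List (Option Int))) (entry : Int × Int)
    (cl : List (Int × Int))
    (hcl : ∀ c ∈ cl, 0 ≤ c.1 ∧ c.1 < (grid.length : Int) ∧ 0 ≤ c.2 ∧
      c.2 < ((grid.headD []).length : Int)) :
    ∀ acc : PySem.Set (Int × Int) × Bool,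
      (∀ p ∈ acc.1, p = entry ∨ pvOk grid p) →
      ∀ p ∈ (cl.foldl (fun a c => pvStepB grid a c.1 c.2) acc).1, p = entry ∨ pvOk grid p := by
  induction cl with
  | nil => intro acc h; exact h
  | cons c cs ih =>
    intro acc hacc
    rw [List.foldl_cons]
    refine ih (fun c' hc' => hcl c' (List.mem_cons_of_mem _ hc')) _ ?_
    intro p hp
    unfold pvStepB at hp
    split at hp
    · rename_i hc
      rcases (PySem.Set.mem_add _ _ _).mp hp with hps | rfl
      · exact hacc p hps
      · obtain ⟨hb0, hb1, hb2, hb3⟩ := hcl c List.mem_cons_self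
        exact Or.inr ⟨hb0, hb1, hb2, hb3, by exact hc.1⟩
    · exact hacc p hp

theorem pvFoldB_nodup (grid : List (List (Option Int))) (cl : List (Int × Int)) :
    ∀ acc : PySem.Set (Int × Int) × Bool, acc.1.Nodup →
      (cl.foldl (fun a c => pvStepB grid a c.1 c.2) acc).1.Nodup := by
  induction cl with
  | nil => intro acc h; exact h
  | cons c cs ih =>
    intro acc hacc
    rw [List.foldl_cons]
    apply ih
    unfold pvStepB
    split
    · exact PySem.Set.nodup_add _ _ hacc
    · exact hacc

theorem pvFoldB_productive (grid : List (List (Option Int))) (cl : List (Int × Int)) :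
    ∀ S : PySem.Set (Int × Int),
      (cl.foldl (fun a c => pvStepB grid a c.1 c.2) (S, false)).2 = true →
      S.length + 1 ≤ (cl.foldl (fun a c => pvStepB grid a c.1 c.2) (S, false)).1.length := by
  induction cl with
  | nil => intro S h; simp at h
  | cons c cs ih =>
    intro S hfl
    rw [List.foldl_cons] at hfl ⊢
    by_cases hc : pvCellNone grid c.1 c.2 = true ∧ ¬ (c.1, c.2) ∈ (S : List (Int × Int)) ∧
        ((c.1 + 1, c.2) ∈ (S : List (Int × Int)) ∨ (c.1 - 1, c.2) ∈ (S : List (Int × Int)) ∨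
         (c.1, c.2 + 1) ∈ (S : List (Int × Int)) ∨ (c.1, c.2 - 1) ∈ (S : List (Int × Int)))
    · have hst : pvStepB grid (S, false) c.1 c.2 = (PySem.Set.add S (c.1, c.2), true) := by
        unfold pvStepB; rw [if_pos hc]
      rw [hst]
      have hlen : (PySem.Set.add S (c.1, c.2)).length = S.length + 1 := by
        rw [PySem.Set.add_of_not_mem hc.2.1]; simp
      have := pvFoldB_len grid cs (PySem.Set.add S (c.1, c.2), true)
      simp only [hlen] at this ⊢
      omega
    · have hst : pvStepB grid (S, false) c.1 c.2 = (S, false) := by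
        unfold pvStepB; rw [if_neg hc]
      rw [hst] at hfl ⊢
      exact ih S hfl

-- at a no-change pass the set is closed under pvStep
theorem pvFixClosed (grid : List (List (Option Int))) (S : PySem.Set (Int × Int))
    (hfix : (pvCells (grid.length : Int) ((grid.headD []).length : Int)).foldl
        (fun a c => pvStepB grid a c.1 c.2) (S, false) = (S, false)) :
    ∀ a b, a ∈ (S : List (Int × Int)) → pvStep grid a b → b ∈ (S : List (Int × Int)) := by
  intro a b ha hab
  obtain ⟨⟨d, hd, hb⟩, hok⟩ := hab
  have hbcells : b ∈ pvCells (grid.length : Int) ((grid.headD []).length : Int) :=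
    (pvMem_cells _ _ b).mpr ⟨hok.1, hok.2.1, hok.2.2.1, hok.2.2.2.1⟩
  have hnc := pvFoldB_fixcond grid _ S hfix b hbcells
  by_contra hbS
  apply hnc
  refine ⟨by simpa using hok.2.2.2.2, by simpa using hbS, ?_⟩
  -- a is one of the four tested neighbours of b
  simp only [pvDirsA, List.mem_cons, List.not_mem_nil, or_false] at hd
  subst hb
  rcases hd with rfl | rfl | rfl | rfl
  · exact Or.inr (Or.inr (Or.inr (by simpa using ha)))
  · exact Or.inr (Or.inr (Or.inl (by simpa using ha)))
  · exact Or.inl (by simpa using ha)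
  · exact Or.inr (Or.inl (by simpa using ha))

theorem pvCellsBounds (grid : List (List (Option Int))) :
    ∀ c ∈ pvCells (grid.length : Int) ((grid.headD []).length : Int),
      0 ≤ c.1 ∧ c.1 < (grid.length : Int) ∧ 0 ≤ c.2 ∧ c.2 < ((grid.headD []).length : Int) :=
  fun c hc => (pvMem_cells _ _ c).mp hc

theorem pvLoopB_correct (grid : List (List (Option Int))) (entry : Int × Int) :
    ∀ (fuel : Nat) (S : PySem.Set (Int × Int)),
    S.Nodup → entry ∈ (S : List (Int × Int)) →
    (∀ p ∈ (S : List (Int × Int)), p = entry ∨ pvOk grid p) →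
    (∀ p ∈ (S : List (Int × Int)), pvReach grid entry p) →
    grid.length * (grid.headD []).length + 2 ≤ fuel + S.length →
    ∀ p, (p ∈ (pvLoopB grid (grid.length : Int) ((grid.headD []).length : Int) fuel S :
        List (Int × Int)) ↔ pvReach grid entry p) := by
  intro fuel
  induction fuel with
  | zero =>
    intro S hnd hent hmem hsound hfuel p
    have := pvCard grid entry S hnd hmem
    omega
  | succ fuel ih =>
    intro S hnd hent hmem hsound hfuel p
    rw [pvLoopB]
    simp only [pvPassB_eq]
    set r := (pvCells (grid.length : Int) ((grid.headD []).length : Int)).foldl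
      (fun a c => pvStepB grid a c.1 c.2) (S, false) with hr
    cases hr2 : r.2
    · -- fixpoint: result is S itself, and S is closed
      have hfix : r = (S, false) := pvFoldB_nochange grid _ S (by rw [← hr]; exact hr2)
      simp only [Bool.false_eq_true, if_false, hfix]
      have hclosed := pvFixClosed grid S (by rw [← hr]; exact hfix)
      constructor
      · exact hsound p
      · intro hreach
        induction hreach with
        | refl => exact hent
        | tail hsteps hstep ihr => exact hclosed _ _ ihr hstep
    · -- a productive pass: recurse
      simp only [if_true]
      have hlen : S.length + 1 ≤ r.1.length := pvFoldB_productive grid _ S (by rw [← hr]; exact hr2)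
      exact ih r.1
        (pvFoldB_nodup grid _ _ hnd)
        (pvFoldB_mono grid _ _ entry hent)
        (pvFoldB_members grid entry _ (pvCellsBounds grid) _ hmem)
        (pvFoldB_sound grid entry _ (pvCellsBounds grid) _ hsound)
        (by omega) p

theorem grid_dfs_alt_iff (grid : List (List (Option Int))) (entry exit : Int × Int) :
    grid_dfs_alt grid entry exit = true ↔ pvReach grid entry exit := by
  have hof : PySem.Set.ofList [entry] = [entry] := by
    simp [PySem.Set.ofList, PySem.Set.add, PySem.Set.empty]
  rw [grid_dfs_alt]
  simp only [hof]
  rw [PySem.Set.contains_iff]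
  exact pvLoopB_correct grid entry _ [entry]
    (by simp) (by simp) (by simp)
    (by intro p hp; simp at hp; subst hp; exact Relation.ReflTransGen.refl)
    (by simp) exit

-- ===== VERDICT (by name: the statement is the Claim_ definition above) =====
theorem grid_dfs_spec : Claim_equal_grid_dfs := by
  intro grid entry exit _ _
  unfold Spec_grid_dfs
  rw [Bool.eq_iff_iff, grid_dfs_iff, grid_dfs_alt_iff]
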